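-- pv_equiv track=rewrite | github.com/sedlacekradek/Algorithms | codility/14/MinMaxDivision.py | solution
-- ===== SOURCE A (Python) =====
-- def count_blocks(mid, A, K):
--     current_sum = 0
--     result = 1
--     for n in A:
--         if current_sum + n > mid:
--             result += 1
--             current_sum = n
--             continue
--         current_sum += n
--     return result <= K
--
-- def solution(K, M, A):
--     low = max(A)
--     high = sum(A)
--     res = float("inf")
--
--     if K == 1:
--         return high
--
--     # search for the possible minimal sum using binary search
--     while low <= high:
--         mid = (low + high) // 2
--         # search if using this sum we do not overreach the maximum number of blocks
--         if count_blocks(mid, A, K):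
--             # if possible result, save it and try a lower sum
--             res = mid
--             high = mid - 1
--         else:
--             # if result not possible (too many blocks), increase the possible sum and try again
--             low = mid + 1
--     return res
-- ===== SOURCE B (Python) =====
-- def solution(K, M, A):
--     # the task states 0 <= A[i] <= M; like min/max on an empty list, reject
--     # input outside that contract (the minimax split is not what A computes there)
--     if min(A) < 0:
--         raise ValueError("negative elements are outside the task's domain")
--     n = len(A)
--     # row[i] = minimal possible maximal block sum when A[:i+1] is split into at most j blocks
--     row = []
--     s = 0
--     for a in A:
--         s += a
--         row.append(s)          # j = 1: a single block holding everything
--     for _ in range(min(K, n) - 1):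
--         prev = row
--         row = [prev[0]]
--         for i in range(1, n):
--             best = prev[i]     # the extra block may stay empty
--             seg = 0
--             for t in range(i, 0, -1):   # last block = A[t..i]
--                 seg += A[t]
--                 cand = prev[t - 1] if prev[t - 1] > seg else seg
--                 if cand < best:
--                     best = cand
--             row.append(best)
--     return row[n - 1]
-- ===== Notes on version B (the rewrite author's own statement) =====
-- stated objective: alternative
-- what changed: Replaces A's binary search over candidate sums (with a greedy block-count feasibility test) by a dynamic program over split points: dp[j][i] = minimal possible maximal block sum of A[:i+1] using at most j blocks, iterated min(K,n)-1 times over the prefix-sum base row; B rejects negative elements (outside the task's stated domain 0<=A[i]<=M) with ValueError.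
-- outside the precondition, e.g. on solution(6, 0, [12, 15, -9]): A returns 15, B raises ValueError; on solution(7, 0, [-10, 7, 20, 5, 12, 3]): A returns 20, B raises ValueError
import Mathlib
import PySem

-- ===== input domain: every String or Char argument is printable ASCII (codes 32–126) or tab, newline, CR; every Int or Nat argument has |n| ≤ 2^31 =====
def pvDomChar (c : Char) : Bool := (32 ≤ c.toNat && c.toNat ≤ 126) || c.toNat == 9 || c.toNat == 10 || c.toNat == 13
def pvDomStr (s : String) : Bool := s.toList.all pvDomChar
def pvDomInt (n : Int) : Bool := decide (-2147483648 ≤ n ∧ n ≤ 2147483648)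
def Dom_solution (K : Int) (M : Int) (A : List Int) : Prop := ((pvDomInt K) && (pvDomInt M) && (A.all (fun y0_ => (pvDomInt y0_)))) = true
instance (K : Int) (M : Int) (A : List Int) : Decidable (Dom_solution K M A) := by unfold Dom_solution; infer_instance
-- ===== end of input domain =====

-- B replaces A's binary search over candidate sums by a dynamic program over split
-- points (dp[j][i] = minimal maximal block sum of A[:i+1] with at most j blocks);
-- objective: alternative (different algorithm, similar cost on these sizes).

-- ===== PORT A =====
-- for n in A: if current_sum + n > mid: result += 1; current_sum = n else current_sum += n
def countBlocksGo (mid : Int) (cs : Int) (res : Int) : List Int → Int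
  | [] => res
  | n :: l => if cs + n > mid then countBlocksGo mid n (res + 1) l
              else countBlocksGo mid (cs + n) res l

def count_blocks (mid : Int) (A : List Int) (K : Int) : Bool :=
  countBlocksGo mid 0 1 A ≤ K

-- the while-loop: res is Option Int (none = the never-returned float('inf'))
def bsLoop (K : Int) (A : List Int) (low high : Int) (res : Option Int) : Option Int :=
  if _h : low ≤ high then
    let mid := PySem.Int.floordiv (low + high) 2
    if count_blocks mid A K then bsLoop K A low (mid - 1) (some mid)
    else bsLoop K A (mid + 1) high res
  else res
termination_by (high + 1 - low).toNat
decreasing_by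
  · have := PySem.Int.floordiv_two_mid_bounds (lo := low) (hi := high) _h
    omega
  · have := PySem.Int.floordiv_two_mid_bounds (lo := low) (hi := high) _h
    omega

def solution (K : Int) (M : Int) (A : List Int) : Int :=
  let low := (PySem.List.max? A (fun x => x)).getD 0   -- max(A): raises on [], outside Pre_
  let high := A.sum
  if K == 1 then high
  else (bsLoop K A low high none).getD 0               -- getD 0: the float('inf') case, outside Pre_

-- ===== PORT B =====
-- s += a; row.append(s)
def pvBaseRow (s : Int) : List Int → List Int
  | [] => []
  | a :: l => (s + a) :: pvBaseRow (s + a) l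

-- for t in range(i, 0, -1): seg += A[t]; cand = max(prev[t-1], seg); best = min(best, cand)
def pvInner (A prev : List Int) : Nat → Int → Int → Int
  | 0, _, best => best
  | t + 1, seg, best =>
      let seg' := seg + A.getD (t + 1) 0
      let p := prev.getD t 0
      let cand := if p > seg' then p else seg'
      pvInner A prev t seg' (if cand < best then cand else best)

-- row = [prev[0]]; for i in range(1, n): row.append(best)
def pvNewRow (A prev : List Int) (n : Nat) : List Int :=
  prev.getD 0 0 :: ((List.range (n - 1)).map (fun k => pvInner A prev (k + 1) 0 (prev.getD (k + 1) 0)))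

-- for _ in range(min(K, n) - 1)
def pvRows (A : List Int) (n : Nat) : Nat → List Int → List Int
  | 0, row => row
  | k + 1, row => pvRows A n k (pvNewRow A row n)

def solution_alt (K : Int) (M : Int) (A : List Int) : Int :=
  if (PySem.List.min? A (fun x => x)).getD 0 < 0 then 0   -- raise ValueError: outside Pre_
  else
    let n := A.length
    let row := pvBaseRow 0 A
    (pvRows A n (min K (n : Int) - 1).toNat row).getD (n - 1) 0   -- row[n-1]: raises on [], outside Pre_

-- ===== PRECONDITION & SPEC =====
-- Pre_ excludes: empty A (both Pythons raise ValueError); K ≤ 0 (A returns float('inf'),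
-- not an int); and lists with a negative entry — outside the task's stated domain
-- 0 ≤ A[i] ≤ M — where A often returns float('inf') and otherwise its binary search rests
-- on a monotonicity that fails there, so its value is an accident of the search path,
-- while B rejects them with ValueError (see cites).
def Pre_solution (K : Int) (M : Int) (A : List Int) : Prop :=
  1 ≤ K ∧ A ≠ [] ∧ ∀ x ∈ A, 0 ≤ x
instance (K : Int) (M : Int) (A : List Int) : Decidable (Pre_solution K M A) := by unfold Pre_solution; infer_instance

def pvWitness_solution : Int × Int × List Int := (2, 7, [1, 5, 2, 3])

def Spec_solution (K : Int) (M : Int) (A : List Int) (out : Int) : Prop := out = solution_alt K M A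
instance (K : Int) (M : Int) (A : List Int) (out : Int) : Decidable (Spec_solution K M A out) := by unfold Spec_solution; infer_instance

-- ===== CLAIM (what is proved, stated in full; the proofs are below) =====
def Claim_equal_solution : Prop := ∀ (K : Int) (M : Int) (A : List Int), Dom_solution K M A → Pre_solution K M A → Spec_solution K M A (solution K M A)

-- ===== LEMMAS AND PROOFS =====

-- number of extra blocks opened by the greedy scan, and its final running sum
def pvSplits (m s : Int) : List Int → Int
  | [] => 0
  | a :: l => if s + a > m then 1 + pvSplits m a l else pvSplits m (s + a) l

def pvEnd (m s : Int) : List Int → Int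
  | [] => s
  | a :: l => if s + a > m then pvEnd m a l else pvEnd m (s + a) l

theorem countBlocksGo_eq (mid cs res : Int) (l : List Int) :
    countBlocksGo mid cs res l = res + pvSplits mid cs l := by
  induction l generalizing cs res with
  | nil => simp [countBlocksGo, pvSplits]
  | cons a l ih => simp only [countBlocksGo, pvSplits]; split <;> rw [ih] <;> ring

theorem pvSplits_nonneg (m s : Int) (l : List Int) : 0 ≤ pvSplits m s l := by
  induction l generalizing s with
  | nil => simp [pvSplits]
  | cons a l ih =>
    simp only [pvSplits]; split
    · have := ih a; omega
    · exact ih _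

theorem pvSplits_le_length (m s : Int) (l : List Int) : pvSplits m s l ≤ l.length := by
  induction l generalizing s with
  | nil => simp [pvSplits]
  | cons a l ih =>
    simp only [pvSplits, List.length_cons]; split
    · have := ih a; push_cast; push_cast at this; omega
    · have := ih (s + a); push_cast; push_cast at this; omega

-- joint monotonicity: in the threshold/start, and a one-extra-split bound for any restart
theorem pvSplits_mono_aux (l : List Int) (hl : ∀ x ∈ l, 0 ≤ x) :
    (∀ m m' s s', m ≤ m' → 0 ≤ s' → s' ≤ s → pvSplits m' s' l ≤ pvSplits m s l) ∧
    (∀ m t u, t ≤ m → 0 ≤ t → 0 ≤ u → pvSplits m t l ≤ 1 + pvSplits m u l) := by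
  induction l with
  | nil => simp [pvSplits]
  | cons a l ih =>
    have ha : 0 ≤ a := hl a (by simp)
    obtain ⟨ihS, ihT⟩ := ih (fun x hx => hl x (List.mem_cons_of_mem _ hx))
    constructor
    · intro m m' s s' h1 h2 h3
      simp only [pvSplits]
      by_cases hc : s + a > m
      · rw [if_pos hc]
        by_cases hc' : s' + a > m'
        · rw [if_pos hc']
          have := ihS m m' a a h1 ha le_rfl; omega
        · rw [if_neg hc']
          have h4 : pvSplits m' (s' + a) l ≤ 1 + pvSplits m' a l :=
            ihT m' (s' + a) a (by omega) (by omega) ha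
          have h5 : pvSplits m' a l ≤ pvSplits m a l := ihS m m' a a h1 ha le_rfl
          omega
      · rw [if_neg hc, if_neg (by omega)]
        exact ihS m m' (s + a) (s' + a) h1 (by omega) (by omega)
    · intro m t u h1 h2 h3
      simp only [pvSplits]
      by_cases hc : t + a > m
      · rw [if_pos hc]
        by_cases hc' : u + a > m
        · rw [if_pos hc']; omega
        · rw [if_neg hc']
          have := ihS m m (u + a) a le_rfl ha (by omega); omega
      · rw [if_neg hc]
        by_cases hc' : u + a > m
        · rw [if_pos hc']
          have := ihT m (t + a) a (by omega) (by omega) ha; omega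
        · rw [if_neg hc']
          exact ihT m (t + a) (u + a) (by omega) (by omega) (by omega)

theorem pvSplits_mono (l : List Int) (hl : ∀ x ∈ l, 0 ≤ x) {m m' s s' : Int}
    (h1 : m ≤ m') (h2 : 0 ≤ s') (h3 : s' ≤ s) : pvSplits m' s' l ≤ pvSplits m s l :=
  (pvSplits_mono_aux l hl).1 m m' s s' h1 h2 h3

theorem pvSplits_restart (l : List Int) (hl : ∀ x ∈ l, 0 ≤ x) {m t u : Int}
    (h1 : t ≤ m) (h2 : 0 ≤ t) (h3 : 0 ≤ u) : pvSplits m t l ≤ 1 + pvSplits m u l :=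
  (pvSplits_mono_aux l hl).2 m t u h1 h2 h3

theorem pvSplits_append (m s : Int) (l₁ l₂ : List Int) :
    pvSplits m s (l₁ ++ l₂) = pvSplits m s l₁ + pvSplits m (pvEnd m s l₁) l₂ := by
  induction l₁ generalizing s with
  | nil => simp [pvSplits, pvEnd]
  | cons a l ih =>
    simp only [List.cons_append, pvSplits, pvEnd]; split
    · rw [ih]; ring
    · rw [ih]

theorem pvSplits_zero_of_sum_le (m s : Int) (l : List Int) (hl : ∀ x ∈ l, 0 ≤ x)
    (hs : 0 ≤ s) (h : s + l.sum ≤ m) : pvSplits m s l = 0 := by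
  induction l generalizing s with
  | nil => simp [pvSplits]
  | cons a l ih =>
    have ha : 0 ≤ a := hl a (by simp)
    have hrest : 0 ≤ l.sum := List.sum_nonneg (fun x hx => hl x (by simp [hx]))
    simp only [pvSplits]
    rw [if_neg (by simp only [List.sum_cons] at h; omega)]
    exact ih (s + a) (fun x hx => hl x (List.mem_cons_of_mem _ hx)) (by omega)
      (by simp only [List.sum_cons] at h; omega)

theorem pvSplits_sum_le (m s : Int) (l : List Int) (hl : ∀ x ∈ l, 0 ≤ x)
    (hs : 0 ≤ s) (hsm : s ≤ m) (h : pvSplits m s l = 0) : s + l.sum ≤ m := by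
  induction l generalizing s with
  | nil => simpa using hsm
  | cons a l ih =>
    have ha : 0 ≤ a := hl a (by simp)
    simp only [pvSplits] at h
    by_cases hc : s + a > m
    · rw [if_pos hc] at h; have := pvSplits_nonneg m a l; omega
    · rw [if_neg hc] at h
      have := ih (s + a) (fun x hx => hl x (List.mem_cons_of_mem _ hx)) (by omega) (by omega) h
      simp only [List.sum_cons]; omega

theorem pvEnd_bounds (m s : Int) (l : List Int) (hl : ∀ x ∈ l, 0 ≤ x ∧ x ≤ m)
    (hs : 0 ≤ s) (hsm : s ≤ m) : 0 ≤ pvEnd m s l ∧ pvEnd m s l ≤ m := by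
  induction l generalizing s with
  | nil => exact ⟨hs, hsm⟩
  | cons a l ih =>
    obtain ⟨ha0, ham⟩ := hl a (by simp)
    simp only [pvEnd]; split
    · exact ih a (fun x hx => hl x (List.mem_cons_of_mem _ hx)) ha0 ham
    · exact ih (s + a) (fun x hx => hl x (List.mem_cons_of_mem _ hx)) (by omega) (by omega)

-- where the greedy scan opens its last block
theorem pvSplits_extract (m : Int) (l : List Int) (hl : ∀ x ∈ l, 0 ≤ x ∧ x ≤ m) :
    ∀ s, 0 ≤ s → s ≤ m → 1 ≤ pvSplits m s l →
    ∃ l₁ a l₂, l = l₁ ++ a :: l₂ ∧ pvSplits m s l = pvSplits m s l₁ + 1 ∧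
      m < pvEnd m s l₁ + a ∧ pvSplits m a l₂ = 0 := by
  induction l with
  | nil => intro s _ _ h; simp [pvSplits] at h
  | cons x r ih =>
    intro s hs0 hsm hsp
    obtain ⟨hx0, hxm⟩ := hl x (by simp)
    have hl' : ∀ y ∈ r, 0 ≤ y ∧ y ≤ m := fun y hy => hl y (List.mem_cons_of_mem _ hy)
    by_cases hc : s + x > m
    · by_cases hz : pvSplits m x r = 0
      · refine ⟨[], x, r, by simp, ?_, ?_, hz⟩
        · simp [pvSplits, if_pos hc, hz]
        · simpa [pvEnd] using hc
      · have h1 : 1 ≤ pvSplits m x r := by have := pvSplits_nonneg m x r; omega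
        obtain ⟨l₁, a, l₂, heq, hcnt, hend, hzero⟩ := ih hl' x hx0 hxm h1
        refine ⟨x :: l₁, a, l₂, by simp [heq], ?_, ?_, hzero⟩
        · simp only [pvSplits, if_pos hc]; omega
        · simpa [pvEnd, if_pos hc] using hend
    · have h1 : 1 ≤ pvSplits m (s + x) r := by
        simp only [pvSplits, if_neg hc] at hsp; exact hsp
      obtain ⟨l₁, a, l₂, heq, hcnt, hend, hzero⟩ := ih hl' (s + x) (by omega) (by omega) h1
      refine ⟨x :: l₁, a, l₂, by simp [heq], ?_, ?_, hzero⟩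
      · simp only [pvSplits, if_neg hc]; omega
      · simpa [pvEnd, if_neg hc] using hend

-- the optimum characterisation: v is feasible for j blocks and least among upper bounds
def pvFeas (m : Int) (l : List Int) (j : Int) : Prop := 1 + pvSplits m 0 l ≤ j

def pvIsOpt (l : List Int) (j v : Int) : Prop :=
  (∀ x ∈ l, x ≤ v) ∧ pvFeas v l j ∧ ∀ m, (∀ x ∈ l, x ≤ m) → pvFeas m l j → v ≤ m

-- base row: with one block the optimum is the prefix sum
theorem pvBaseRow_getD (s : Int) (l : List Int) (i : Nat) (hi : i < l.length) :
    (pvBaseRow s l).getD i 0 = s + (l.take (i + 1)).sum := by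
  induction l generalizing s i with
  | nil => simp at hi
  | cons a l ih =>
    cases i with
    | zero => simp [pvBaseRow]
    | succ i =>
      simp only [pvBaseRow, List.getD_cons_succ, List.take_succ_cons, List.sum_cons]
      rw [ih (s + a) i (by simpa using hi)]; ring

-- on admitted input the contract guard does not fire
theorem solution_alt_eq (K M : Int) (A : List Int) (hne : A ≠ []) (hl : ∀ x ∈ A, 0 ≤ x) :
    solution_alt K M A =
      (pvRows A A.length (min K (A.length : Int) - 1).toNat (pvBaseRow 0 A)).getD
        (A.length - 1) 0 := by
  obtain ⟨m, hm⟩ : ∃ m, PySem.List.min? A (fun x => x) = some m := by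
    cases h : PySem.List.min? A (fun x => x) with
    | none => exact absurd ((PySem.List.min?_eq_none_iff _ _).mp h) hne
    | some m => exact ⟨m, rfl⟩
  have h0 : 0 ≤ m := hl m (PySem.List.min?_mem hm)
  unfold solution_alt
  rw [hm, if_neg (by simpa using h0)]

theorem pvIsOpt_base (l : List Int) (hne : l ≠ []) (hl : ∀ x ∈ l, 0 ≤ x) :
    pvIsOpt l 1 l.sum := by
  have hnn : ∀ x ∈ l, x ≤ l.sum := fun x hx => List.single_le_sum hl x hx
  refine ⟨hnn, ?_, ?_⟩
  · have : pvSplits l.sum 0 l = 0 :=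
      pvSplits_zero_of_sum_le _ 0 l hl le_rfl (by omega)
    unfold pvFeas; omega
  · intro m hb hf
    obtain ⟨a, ha⟩ : ∃ a, a ∈ l := by
      cases l with | nil => exact absurd rfl hne | cons a l => exact ⟨a, by simp⟩
    have h0m : 0 ≤ m := le_trans (hl a ha) (hb a ha)
    unfold pvFeas at hf
    have hz : pvSplits m 0 l = 0 := by have := pvSplits_nonneg m 0 l; omega
    have := pvSplits_sum_le m 0 l hl le_rfl h0m hz
    omega

-- the inner loop computes the minimum over the split candidates
def pvSeg (A : List Int) (t i : Nat) : Int := ((A.drop t).take (i + 1 - t)).sum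

def pvCand (A prev : List Int) (t i : Nat) : Int := max (prev.getD (t - 1) 0) (pvSeg A t i)

theorem pvSeg_cons (A : List Int) (t i : Nat) (ht : t ≤ i) (hi : i < A.length) :
    pvSeg A t i = A.getD t 0 + pvSeg A (t + 1) i := by
  have htl : t < A.length := by omega
  unfold pvSeg
  rw [List.drop_eq_getElem_cons htl]
  have h1 : i + 1 - t = (i - t) + 1 := by omega
  have h2 : i + 1 - (t + 1) = i - t := by omega
  rw [h1, h2, List.take_succ_cons, List.sum_cons, List.getD_eq_getElem A 0 htl]

theorem pvSeg_empty (A : List Int) (i : Nat) : pvSeg A (i + 1) i = 0 := by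
  unfold pvSeg
  have : i + 1 - (i + 1) = 0 := by omega
  rw [this]; simp

theorem pvInner_spec (A prev : List Int) (i : Nat) (hi : i < A.length) :
    ∀ u best, u ≤ i →
      (pvInner A prev u (pvSeg A (u + 1) i) best ≤ best ∧
       (∀ t, 1 ≤ t → t ≤ u → pvInner A prev u (pvSeg A (u + 1) i) best ≤ pvCand A prev t i) ∧
       (pvInner A prev u (pvSeg A (u + 1) i) best = best ∨
        ∃ t, 1 ≤ t ∧ t ≤ u ∧ pvInner A prev u (pvSeg A (u + 1) i) best = pvCand A prev t i)) := by
  intro u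
  induction u with
  | zero =>
    intro best _
    refine ⟨le_rfl, ?_, Or.inl rfl⟩
    intro t ht1 ht2; omega
  | succ u ihu =>
    intro best hu
    have hseg : pvSeg A (u + 1 + 1) i + A.getD (u + 1) 0 = pvSeg A (u + 1) i := by
      rw [pvSeg_cons A (u + 1) i (by omega) hi]; ring
    have hcand : (if prev.getD u 0 > pvSeg A (u + 1) i then prev.getD u 0
        else pvSeg A (u + 1) i) = pvCand A prev (u + 1) i := by
      unfold pvCand
      simp only [Nat.add_sub_cancel]
      split <;> omega
    have hrun : pvInner A prev (u + 1) (pvSeg A (u + 1 + 1) i) best =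
        pvInner A prev u (pvSeg A (u + 1) i)
          (if pvCand A prev (u + 1) i < best then pvCand A prev (u + 1) i else best) := by
      simp only [pvInner, hseg, hcand]
    set best' := if pvCand A prev (u + 1) i < best then pvCand A prev (u + 1) i else best with hb'
    obtain ⟨ih1, ih2, ih3⟩ := ihu best' (by omega)
    rw [hrun]
    refine ⟨?_, ?_, ?_⟩
    · have : best' ≤ best := by rw [hb']; split <;> omega
      omega
    · intro t ht1 ht2
      rcases Nat.lt_or_ge t (u + 1) with h | h
      · exact ih2 t ht1 (by omega)
      · have : t = u + 1 := by omega
        subst this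
        have : best' ≤ pvCand A prev (u + 1) i := by rw [hb']; split <;> omega
        omega
    · rcases ih3 with h | ⟨t, ht1, ht2, ht3⟩
      · rw [h, hb']
        split
        · exact Or.inr ⟨u + 1, by omega, le_rfl, rfl⟩
        · exact Or.inl rfl
      · exact Or.inr ⟨t, ht1, by omega, ht3⟩

theorem pvNewRow_getD_zero (A prev : List Int) (n : Nat) :
    (pvNewRow A prev n).getD 0 0 = prev.getD 0 0 := rfl

theorem pvNewRow_getD_succ (A prev : List Int) (n k : Nat) (hk : k < n - 1) :
    (pvNewRow A prev n).getD (k + 1) 0 = pvInner A prev (k + 1) 0 (prev.getD (k + 1) 0) := by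
  unfold pvNewRow
  rw [List.getD_cons_succ]
  rw [List.getD_eq_getElem _ 0 (by simpa using hk)]
  simp

theorem pvFeas_singleton (l : List Int) (m j' : Int) (h1 : l.length = 1)
    (hb : ∀ x ∈ l, x ≤ m) (hj : 1 ≤ j') : pvFeas m l j' := by
  obtain ⟨a, rfl⟩ := List.length_eq_one_iff.mp h1
  have := hb a (by simp)
  unfold pvFeas pvSplits
  rw [if_neg (by omega)]
  simp only [pvSplits]; omega

-- one DP step preserves the optimum characterisation, with one more block allowed
theorem pvNewRow_spec (A prev : List Int) (n : Nat) (hn : n = A.length) (hne : A ≠ [])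
    (hl : ∀ x ∈ A, 0 ≤ x) (j : Int) (hj : 1 ≤ j)
    (hprev : ∀ i, i < n → pvIsOpt (A.take (i + 1)) j (prev.getD i 0)) :
    ∀ i, i < n → pvIsOpt (A.take (i + 1)) (j + 1) ((pvNewRow A prev n).getD i 0) := by
  intro i hin
  have hlen : (A.take (i + 1)).length = i + 1 := by
    rw [List.length_take]; omega
  have hsubl : ∀ x ∈ A.take (i + 1), 0 ≤ x := fun x hx => hl x (List.mem_of_mem_take hx)
  cases i with
  | zero =>
    rw [pvNewRow_getD_zero]
    obtain ⟨hb, hf, hle⟩ := hprev 0 hin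
    refine ⟨hb, by unfold pvFeas at hf ⊢; omega, ?_⟩
    intro m hbm hfm
    exact hle m hbm (pvFeas_singleton _ m j hlen hbm hj)
  | succ k =>
    set i := k + 1 with hidef
    have hiA : i < A.length := by omega
    rw [pvNewRow_getD_succ A prev n k (by omega)]
    set l := A.take (i + 1) with hldef
    -- the inner loop's characterisation
    have hrun0 : pvInner A prev i 0 (prev.getD i 0) =
        pvInner A prev i (pvSeg A (i + 1) i) (prev.getD i 0) := by rw [pvSeg_empty]
    obtain ⟨hle_best, hle_cand, hcases⟩ :=
      pvInner_spec A prev i hiA i (prev.getD i 0) le_rfl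
    rw [← hrun0] at hle_best hle_cand hcases
    set res := pvInner A prev i 0 (prev.getD i 0) with hres
    -- decomposition of l at a split point t ∈ [1, i]
    have hdecomp : ∀ t, 1 ≤ t → t ≤ i →
        l.take t = A.take t ∧ (l.drop t).sum = pvSeg A t i := by
      intro t ht1 ht2
      constructor
      · rw [hldef, List.take_take]; congr 1; omega
      · rw [hldef, List.drop_take]; rfl
    -- every candidate (and prev[i]) is an upper bound and feasible for j+1 blocks
    have hgood : ∀ t, 1 ≤ t → t ≤ i →
        (∀ x ∈ l, x ≤ pvCand A prev t i) ∧ pvFeas (pvCand A prev t i) l (j + 1) := by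
      intro t ht1 ht2
      obtain ⟨htake, hdropsum⟩ := hdecomp t ht1 ht2
      obtain ⟨hpb, hpf, _⟩ := hprev (t - 1) (by omega)
      have htm1 : t - 1 + 1 = t := by omega
      rw [htm1] at hpb hpf
      set p := prev.getD (t - 1) 0 with hp
      set c := pvCand A prev t i with hc
      have hpc : p ≤ c := le_max_left _ _
      have hsc : pvSeg A t i ≤ c := le_max_right _ _
      have htne : A.take t ≠ [] := by
        have : (A.take t).length = t := by rw [List.length_take]; omega
        intro h; rw [h] at this; simp at this; omega
      obtain ⟨a0, ha0⟩ : ∃ a0, a0 ∈ A.take t := by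
        cases h : A.take t with
        | nil => exact absurd h htne
        | cons a t' => exact ⟨a, by simp [h]⟩
      have hp0 : 0 ≤ p := le_trans (hl a0 (List.mem_of_mem_take ha0)) (hpb a0 ha0)
      have hc0 : 0 ≤ c := le_trans hp0 hpc
      have hsplit : l = A.take t ++ l.drop t := by
        rw [← htake, List.take_append_drop]
      constructor
      · intro x hx
        rw [hsplit] at hx
        rcases List.mem_append.mp hx with h | h
        · exact le_trans (hpb x h) hpc
        · have : x ≤ (l.drop t).sum :=
            List.single_le_sum (fun y hy => hsubl y (List.mem_of_mem_drop hy)) x h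
          omega
      · unfold pvFeas
        rw [hsplit, pvSplits_append]
        have hs1 : pvSplits c 0 (A.take t) ≤ j - 1 := by
          have hmono : pvSplits c 0 (A.take t) ≤ pvSplits p 0 (A.take t) :=
            pvSplits_mono _ (fun x hx => hl x (List.mem_of_mem_take hx)) hpc le_rfl le_rfl
          unfold pvFeas at hpf; omega
        have hebnd : 0 ≤ pvEnd c 0 (A.take t) ∧ pvEnd c 0 (A.take t) ≤ c :=
          pvEnd_bounds c 0 (A.take t)
            (fun x hx => ⟨hl x (List.mem_of_mem_take hx), le_trans (hpb x hx) hpc⟩)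
            le_rfl hc0
        have hs2 : pvSplits c (pvEnd c 0 (A.take t)) (l.drop t) ≤ 1 := by
          have hz : pvSplits c 0 (l.drop t) = 0 :=
            pvSplits_zero_of_sum_le c 0 (l.drop t)
              (fun x hx => hsubl x (List.mem_of_mem_drop hx)) le_rfl (by omega)
          have := pvSplits_restart (l.drop t)
            (fun x hx => hsubl x (List.mem_of_mem_drop hx)) hebnd.2 hebnd.1 le_rfl
          omega
        omega
    refine ⟨?_, ?_, ?_⟩
    · -- upper bound
      rcases hcases with h | ⟨t, ht1, ht2, ht3⟩
      · rw [h]; exact (hprev i (by omega)).1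
      · rw [ht3]; exact (hgood t ht1 ht2).1
    · -- feasibility
      rcases hcases with h | ⟨t, ht1, ht2, ht3⟩
      · obtain ⟨_, hf, _⟩ := hprev i (by omega)
        rw [← hldef] at hf
        rw [h]; unfold pvFeas at hf ⊢; omega
      · rw [ht3]; exact (hgood t ht1 ht2).2
    · -- leastness
      intro m hbm hfm
      have hml : ∀ x ∈ l, 0 ≤ x ∧ x ≤ m := fun x hx => ⟨hsubl x hx, hbm x hx⟩
      obtain ⟨a0, ha0⟩ : ∃ a0, a0 ∈ l := by
        cases h : l with
        | nil => rw [h] at hlen; simp at hlen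
        | cons a t' => exact ⟨a, by simp [h]⟩
      have hm0 : 0 ≤ m := le_trans (hsubl a0 ha0) (hbm a0 ha0)
      unfold pvFeas at hfm
      by_cases hsp : 1 + pvSplits m 0 l ≤ j
      · -- m already feasible for j blocks: compare with prev[i]
        obtain ⟨_, _, hle⟩ := hprev i (by omega)
        exact le_trans hle_best (hle m hbm hsp)
      · -- the greedy scan at m opens exactly j blocks: find its last split
        have h1 : 1 ≤ pvSplits m 0 l := by omega
        obtain ⟨l₁, a, l₂, heq, hcnt, hend, hzero⟩ :=
          pvSplits_extract m l hml 0 le_rfl hm0 h1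
        have hane : l₁ ≠ [] := by
          intro h; rw [h] at hend
          simp only [pvEnd] at hend
          have : a ∈ l := by rw [heq, h]; simp
          have := hbm a this; omega
        set t := l₁.length with ht
        have ht1 : 1 ≤ t := by
          cases h : l₁ with
          | nil => exact absurd h hane
          | cons x r => rw [ht, h]; simp
        have hlsum : l.length = t + 1 + l₂.length := by rw [heq]; simp; omega
        have ht2 : t ≤ i := by omega
        have htake : l.take t = l₁ := by rw [heq, ht, List.take_left]
        have hdrop : l.drop t = a :: l₂ := by rw [heq, ht, List.drop_left]
        obtain ⟨htakeA, hdropsum⟩ := hdecomp t ht1 ht2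
        -- prev[t-1] ≤ m
        obtain ⟨_, _, hleT⟩ := hprev (t - 1) (by omega)
        have htm1 : t - 1 + 1 = t := by omega
        rw [htm1] at hleT
        have hprevle : prev.getD (t - 1) 0 ≤ m := by
          apply hleT m
          · intro x hx
            rw [← htakeA] at hx
            exact hbm x (List.mem_of_mem_take hx)
          · unfold pvFeas
            have : pvSplits m 0 (A.take t) = pvSplits m 0 l₁ := by rw [← htakeA, htake]
            omega
        -- the last block's sum is ≤ m
        have ham : a ≤ m := by
          have : a ∈ l := by rw [heq]; simp
          exact hbm a this
        have ha0' : 0 ≤ a := by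
          have : a ∈ l := by rw [heq]; simp
          exact (hml a this).1
        have hsegle : pvSeg A t i ≤ m := by
          have hsum := pvSplits_sum_le m a l₂
            (fun x hx => (hml x (by rw [heq]; simp [hx])).1) ha0' ham hzero
          rw [← hdropsum, hdrop]
          simp only [List.sum_cons]; omega
        have hcle : pvCand A prev t i ≤ m := max_le hprevle hsegle
        exact le_trans (hle_cand t ht1 ht2) hcle

theorem pvRows_spec (A : List Int) (n : Nat) (hn : n = A.length) (hne : A ≠ [])
    (hl : ∀ x ∈ A, 0 ≤ x) :
    ∀ (k : Nat) (j : Int) (row : List Int), 1 ≤ j →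
      (∀ i, i < n → pvIsOpt (A.take (i + 1)) j (row.getD i 0)) →
      ∀ i, i < n → pvIsOpt (A.take (i + 1)) (j + (k : Int)) ((pvRows A n k row).getD i 0) := by
  intro k
  induction k with
  | zero => intro j row hj hrow i hi; simpa using hrow i hi
  | succ k ih =>
    intro j row hj hrow i hi
    have hstep := pvNewRow_spec A row n hn hne hl j hj hrow
    have := ih (j + 1) (pvNewRow A row n) (by omega) hstep i hi
    have hc : j + 1 + (k : Int) = j + ((k + 1 : Nat) : Int) := by push_cast; ring
    rw [hc] at this
    exact this

-- B's value is the optimum for at most min(K, n) blocks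
theorem solution_alt_isOpt (K M : Int) (A : List Int) (hK : 1 ≤ K) (hne : A ≠ [])
    (hl : ∀ x ∈ A, 0 ≤ x) :
    pvIsOpt A (min K (A.length : Int)) (solution_alt K M A) := by
  have hn1 : 1 ≤ A.length := by
    cases A with | nil => exact absurd rfl hne | cons a t => simp
  have hbase : ∀ i, i < A.length → pvIsOpt (A.take (i + 1)) 1 ((pvBaseRow 0 A).getD i 0) := by
    intro i hi
    rw [pvBaseRow_getD 0 A i hi, zero_add]
    apply pvIsOpt_base
    · intro h
      have h2 := congrArg List.length h
      rw [List.length_take] at h2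
      simp only [List.length_nil] at h2
      omega
    · exact fun x hx => hl x (List.mem_of_mem_take hx)
  have hrows := pvRows_spec A A.length rfl hne hl (min K (A.length : Int) - 1).toNat 1
    (pvBaseRow 0 A) le_rfl hbase (A.length - 1) (by omega)
  have htn : (1 : Int) + ((min K (A.length : Int) - 1).toNat : Int) = min K (A.length : Int) := by
    omega
  rw [htn] at hrows
  have hta : A.take (A.length - 1 + 1) = A := by
    have : A.length - 1 + 1 = A.length := by omega
    rw [this, List.take_length]
  rw [hta] at hrows
  rw [solution_alt_eq K M A hne hl]
  exact hrows

-- the binary search returns any value v at which feasibility turns from false to true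
theorem bsLoop_correct (K : Int) (A : List Int) (low₀ v : Int)
    (hmono : ∀ m, v ≤ m → count_blocks m A K = true)
    (hleast : ∀ m, low₀ ≤ m → m < v → count_blocks m A K = false) :
    ∀ low high res, low₀ ≤ low → low ≤ v → v ≤ high + 1 →
      (v = high + 1 → res = some v) → bsLoop K A low high res = some v := by
  have main : ∀ (N : Nat), ∀ low high res, (high + 1 - low).toNat ≤ N →
      low₀ ≤ low → low ≤ v → v ≤ high + 1 →
      (v = high + 1 → res = some v) → bsLoop K A low high res = some v := by
    intro N
    induction N with
    | zero =>
      intro low high res hN h1 h2 h3 h4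
      rw [bsLoop, dif_neg (show ¬ low ≤ high by omega)]
      exact h4 (by omega)
    | succ N ih =>
      intro low high res hN h1 h2 h3 h4
      by_cases hlh : low ≤ high
      · rw [bsLoop, dif_pos hlh]
        show (if count_blocks (PySem.Int.floordiv (low + high) 2) A K then
                bsLoop K A low (PySem.Int.floordiv (low + high) 2 - 1)
                  (some (PySem.Int.floordiv (low + high) 2))
              else bsLoop K A (PySem.Int.floordiv (low + high) 2 + 1) high res) = some v
        obtain ⟨hm1, hm2⟩ := PySem.Int.floordiv_two_mid_bounds (lo := low) (hi := high) hlh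
        set mid := PySem.Int.floordiv (low + high) 2 with hmid
        by_cases hcb : count_blocks mid A K = true
        · simp only [hcb, if_true]
          have hvm : v ≤ mid := by
            by_contra h
            have := hleast mid (by omega) (by omega)
            rw [hcb] at this; exact absurd this (by simp)
          exact ih low (mid - 1) (some mid) (by omega) h1 h2 (by omega)
            (fun h => by rw [h]; ring_nf)
        · simp only [hcb, if_false]
          have hvm : mid < v := by
            by_contra h
            exact hcb (hmono mid (by omega))
          exact ih (mid + 1) high res (by omega) (by omega) (by omega) h3 h4
      · rw [bsLoop, dif_neg hlh]
        exact h4 (by omega)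
  exact fun low high res h1 h2 h3 h4 =>
    main (high + 1 - low).toNat low high res le_rfl h1 h2 h3 h4

-- with K = 1 only one block is allowed: both sides give sum(A)
theorem solution_alt_K1 (M : Int) (A : List Int) (hne : A ≠ []) (hl : ∀ x ∈ A, 0 ≤ x) :
    solution_alt 1 M A = A.sum := by
  have hn1 : 1 ≤ A.length := by
    cases A with | nil => exact absurd rfl hne | cons a t => simp
  rw [solution_alt_eq 1 M A hne hl]
  have h0 : (min (1 : Int) (A.length : Int) - 1).toNat = 0 := by omega
  rw [h0]
  simp only [pvRows]
  rw [pvBaseRow_getD 0 A (A.length - 1) (by omega)]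
  have : A.length - 1 + 1 = A.length := by omega
  rw [this, List.take_length, zero_add]

-- ===== VERDICT (by name: the statement is the Claim_ definition above) =====
theorem solution_spec : Claim_equal_solution := by
  intro K M A _hdom hpre
  obtain ⟨hK, hne, hl⟩ := hpre
  unfold Spec_solution
  have hn1 : 1 ≤ A.length := by
    cases A with | nil => exact absurd rfl hne | cons a t => simp
  by_cases hK1 : K = 1
  · subst hK1
    rw [solution_alt_K1 M A hne hl]
    simp [solution]
  have hopt := solution_alt_isOpt K M A hK hne hl
  -- max(A)
  obtain ⟨mx, hmx⟩ : ∃ mx, PySem.List.max? A (fun x => x) = some mx := by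
    cases h : PySem.List.max? A (fun x => x) with
    | none => exact absurd ((PySem.List.max?_eq_none_iff _ _).mp h) hne
    | some m => exact ⟨m, rfl⟩
  have hmxA : mx ∈ A := PySem.List.max?_mem hmx
  have hmxMax : ∀ y ∈ A, y ≤ mx := fun y hy => PySem.List.max?_isMax hmx y hy
  have hsum_bound : ∀ x ∈ A, x ≤ A.sum := fun x hx => List.single_le_sum hl x hx
  have hminj : (1 : Int) ≤ min K (A.length : Int) := by omega
  have hBsum : solution_alt K M A ≤ A.sum := by
    apply hopt.2.2 A.sum hsum_bound
    have : pvSplits A.sum 0 A = 0 :=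
      pvSplits_zero_of_sum_le _ 0 A hl le_rfl (by omega)
    unfold pvFeas; omega
  · simp only [solution]
    rw [if_neg (show ¬ (K == 1) = true by simpa using hK1)]
    rw [bsLoop_correct K A ((PySem.List.max? A (fun x => x)).getD 0) (solution_alt K M A)
      ?_ ?_ _ _ _ le_rfl ?_ (by omega) (fun h => absurd h (by omega))]
    · rfl
    · -- monotone feasibility above B's value
      intro m hm
      have hf := hopt.2.1
      unfold pvFeas at hf
      have := pvSplits_mono A hl hm le_rfl le_rfl
      simp only [count_blocks, countBlocksGo_eq, decide_eq_true_eq]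
      omega
    · -- nothing smaller (≥ max(A)) is feasible
      intro m hm hmv
      rw [hmx] at hm
      simp only [Option.getD_some] at hm
      by_contra hcb
      have hcb' : count_blocks m A K = true := by
        cases h : count_blocks m A K with
        | true => rfl
        | false => exact absurd h hcb
      have hfm : countBlocksGo m 0 1 A ≤ K := by
        simpa [count_blocks] using hcb'
      rw [countBlocksGo_eq] at hfm
      have hbm : ∀ x ∈ A, x ≤ m := fun x hx => le_trans (hmxMax x hx) hm
      -- the greedy scan never opens more blocks than there are elements
      have hcount : pvSplits m 0 A ≤ (A.length : Int) - 1 := by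
        cases A with
        | nil => exact absurd rfl hne
        | cons a t =>
          have ham : a ≤ m := hbm a (by simp)
          simp only [pvSplits, zero_add, if_neg (by omega)]
          have := pvSplits_le_length m a t
          simp only [List.length_cons]
          push_cast
          omega
      have : solution_alt K M A ≤ m := by
        apply hopt.2.2 m hbm
        unfold pvFeas
        omega
      omega
    · -- max(A) ≤ B's value
      rw [hmx]
      simpa using hopt.1 mx hmxA
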